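-- pv_equiv track=rewrite | github.com/Shawn0220/REALLAB_FinLLM | functions/local_data_loader.py | get_latest_report_before
-- ===== SOURCE A (Python) =====
-- def get_latest_report_before(reports: list, today: str) -> dict:
--     filtered = [
--         r for r in reports
--         if "fiscalDateEnding" in r and r["fiscalDateEnding"] <= today
--     ]
--     if not filtered:
--         return {}
--     return sorted(filtered, key=lambda x: x["fiscalDateEnding"], reverse=True)[0]
-- ===== SOURCE B (Python) =====
-- def get_latest_report_before(reports: list, today: str) -> dict:
--     best = {}
--     best_date = None
--     for r in reports:
--         if "fiscalDateEnding" not in r: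
--             continue
--         d = r["fiscalDateEnding"]
--         if d <= today and (best_date is None or d > best_date):
--             best = r
--             best_date = d
--     return best
-- ===== Notes on version B (the rewrite author's own statement) =====
-- stated objective: simpler
-- what changed: Replaced A's build-filtered-list + stable reverse sort + take-head with a single running-max pass over reports keeping only the best report and its date (strict '>' preserves A's first-occurrence tie-break, {} initializer covers the no-match case).
import Mathlib
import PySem

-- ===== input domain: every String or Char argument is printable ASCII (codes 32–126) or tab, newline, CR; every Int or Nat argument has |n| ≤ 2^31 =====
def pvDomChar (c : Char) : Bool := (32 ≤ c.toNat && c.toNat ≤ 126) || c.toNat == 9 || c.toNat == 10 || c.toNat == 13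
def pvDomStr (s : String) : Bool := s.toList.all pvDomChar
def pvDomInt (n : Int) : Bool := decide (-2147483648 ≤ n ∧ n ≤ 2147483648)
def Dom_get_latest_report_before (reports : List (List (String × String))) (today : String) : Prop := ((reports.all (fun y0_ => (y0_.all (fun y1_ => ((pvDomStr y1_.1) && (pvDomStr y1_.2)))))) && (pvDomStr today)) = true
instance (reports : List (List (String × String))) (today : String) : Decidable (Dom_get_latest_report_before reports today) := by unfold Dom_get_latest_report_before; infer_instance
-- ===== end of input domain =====

-- B replaces A's filter + stable reverse sort + take-head with a single running-max pass
-- (strict '>' keeps A's first-occurrence tie-break); objective: simpler.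


-- ===== PORT A =====
-- '"fiscalDateEnding" in r and r["fiscalDateEnding"] <= today' ported as a match on the
-- dict lookup (first clause guards the second, so the lookup never raises).
def pvFdeOk (today : String) (r : List (String × String)) : Bool :=
  match (PySem.Dict.mk r).get? "fiscalDateEnding" with
  | none => false
  | some d => decide (d ≤ today)

-- sort key r["fiscalDateEnding"]; total surrogate getD "" — every sorted element passed
-- the filter, so the key is present there and the port is exact.
def pvFdeKey (r : List (String × String)) : String :=
  ((PySem.Dict.mk r).get? "fiscalDateEnding").getD ""

def get_latest_report_before (reports : List (List (String × String))) (today : String) : List (String × String) :=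
  let filtered := reports.filter (pvFdeOk today)
  if filtered = [] then []
  else (PySem.List.sorted filtered pvFdeKey true).headD []

-- ===== PORT B =====
def get_latest_report_before_alt (reports : List (List (String × String))) (today : String) : List (String × String) :=
  (reports.foldl (fun st r =>
      match (PySem.Dict.mk r).get? "fiscalDateEnding" with
      | none => st
      | some d =>
        if d ≤ today then
          match st.2 with
          | none => (r, some d)
          | some bd => if bd < d then (r, some d) else st
        else st)
    (([] : List (String × String)), (none : Option String))).1

-- ===== PRECONDITION & SPEC =====
def Spec_get_latest_report_before (reports : List (List (String × String))) (today : String) (out : List (String × String)) : Prop := out = get_latest_report_before_alt reports today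
instance (reports : List (List (String × String))) (today : String) (out : List (String × String)) : Decidable (Spec_get_latest_report_before reports today out) := by unfold Spec_get_latest_report_before; infer_instance

-- ===== CLAIM (what is proved, stated in full; the proofs are below) =====
def Claim_equal_get_latest_report_before : Prop := ∀ (reports : List (List (String × String))) (today : String), Dom_get_latest_report_before reports today → Spec_get_latest_report_before reports today (get_latest_report_before reports today)

-- ===== LEMMAS AND PROOFS =====

-- B's running-max update, restricted to elements that pass A's filter
def pvUpd (st : List (String × String) × Option String) (r : List (String × String)) :
    List (String × String) × Option String :=
  match st.2 with
  | none => (r, some (pvFdeKey r))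
  | some bd => if bd < pvFdeKey r then (r, some (pvFdeKey r)) else st

-- B's fold over all reports equals the running-max fold over A's filtered list
theorem pvFoldFilter (today : String) (reports : List (List (String × String)))
    (st : List (String × String) × Option String) :
    reports.foldl (fun st r =>
      match (PySem.Dict.mk r).get? "fiscalDateEnding" with
      | none => st
      | some d =>
        if d ≤ today then
          match st.2 with
          | none => (r, some d)
          | some bd => if bd < d then (r, some d) else st
        else st) st
    = (reports.filter (pvFdeOk today)).foldl pvUpd st := by
  induction reports generalizing st with
  | nil => rfl
  | cons r rest ih =>
    have hstep : (match (PySem.Dict.mk r).get? "fiscalDateEnding" with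
      | none => st
      | some d =>
        if d ≤ today then
          match st.2 with
          | none => (r, some d)
          | some bd => if bd < d then (r, some d) else st
        else st) = if pvFdeOk today r then pvUpd st r else st := by
      unfold pvFdeOk pvUpd pvFdeKey
      cases h : (PySem.Dict.mk r).get? "fiscalDateEnding" with
      | none => simp
      | some d =>
        simp only [h, Option.getD_some]
        by_cases hd : d ≤ today
        · simp only [if_pos hd, hd, decide_true, if_pos]
        · simp only [if_neg hd, hd, decide_false, Bool.false_eq_true, if_neg, not_false_eq_true]
    simp only [List.foldl_cons, List.filter_cons]
    rw [hstep]
    split_ifs with hp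
    · rw [List.foldl_cons]
      exact ih _
    · exact ih _

-- invariant linking the insertion-sort accumulator's head with the running-max state
def pvInv (acc : List (List (String × String))) (st : List (String × String) × Option String) : Prop :=
  (acc = [] ∧ st = ([], none)) ∨ (∃ m t, acc = m :: t ∧ st = (m, some (pvFdeKey m)))

theorem pvInvStep (F : List (List (String × String)))
    (acc : List (List (String × String))) (st : List (String × String) × Option String)
    (h : pvInv acc st) :
    pvInv (F.foldl (fun acc x => PySem.List.insertBy (fun a b => decide (pvFdeKey b < pvFdeKey a)) x acc) acc)
          (F.foldl pvUpd st) := by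
  induction F generalizing acc st with
  | nil => exact h
  | cons x rest ih =>
    simp only [List.foldl_cons]
    apply ih
    rcases h with ⟨hacc, hst⟩ | ⟨m, t, hacc, hst⟩
    · subst hacc; subst hst
      exact Or.inr ⟨x, [], rfl, rfl⟩
    · subst hacc; subst hst
      unfold PySem.List.insertBy pvUpd
      by_cases hlt : pvFdeKey m < pvFdeKey x
      · simp [hlt]
        exact Or.inr ⟨x, m :: t, rfl, rfl⟩
      · simp [hlt]
        exact Or.inr ⟨m, _, rfl, rfl⟩

-- ===== VERDICT (by name: the statement is the Claim_ definition above) =====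
theorem get_latest_report_before_spec : Claim_equal_get_latest_report_before := by
  intro reports today _
  unfold Spec_get_latest_report_before get_latest_report_before get_latest_report_before_alt
  rw [pvFoldFilter]
  set F := reports.filter (pvFdeOk today) with hF
  have hinv := pvInvStep F [] (([], none)) (Or.inl ⟨rfl, rfl⟩)
  have hsorted : PySem.List.sorted F pvFdeKey true
      = F.foldl (fun acc x => PySem.List.insertBy (fun a b => decide (pvFdeKey b < pvFdeKey a)) x acc) [] :=
    PySem.List.sorted_rev_eq_foldl_insertBy F pvFdeKey
  rcases hinv with ⟨hacc, hst⟩ | ⟨m, t, hacc, hst⟩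
  · -- accumulator empty ⇒ F = [] (sorted is a permutation of F)
    have hFnil : F = [] := by
      have hperm := PySem.List.sorted_eq_nil_iff (xs := F) (key := pvFdeKey) (rev := true)
      rw [hsorted] at hperm
      exact hperm.mp hacc
    simp [hFnil]
  · have hFne : ¬ F = [] := by
      intro hnil
      rw [hnil] at hacc
      exact List.cons_ne_nil m t hacc.symm
    rw [if_neg hFne, hsorted, hacc, hst]
    rfl
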